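-- pv_equiv track=rewrite | github.com/sebastianbreguel/Data-Structures-And-Algorithms | T2/check_backtracking.py | knight_movements
-- ===== SOURCE A (Python) =====
-- def knight_movements(board, x, y, movement):
--     if x < 0 or x > 7:
--         return False
--     if y < 0 or y > 7:
--         return False
--     if board[y][x] != movement:
--         return False
--
--     if movement == 64:
--         return True
--
--     x_move = [2, 1, -1, -2, -2, -1, 1, 2]
--     y_move = [1, 2, 2, 1, -1, -2, -2, -1]
--     for i in range(len(x_move)):
--         result = knight_movements(board, x+x_move[i], y+y_move[i], movement+1)
--         if result:
--             return result
--     return False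
-- ===== SOURCE B (Python) =====
-- def knight_movements(board, x, y, movement):
--     if not (0 <= x <= 7 and 0 <= y <= 7):
--         return False
--     if board[y][x] != movement:
--         return False
--     if movement == 64:
--         return True
--     moves = [(2, 1), (1, 2), (-1, 2), (-2, 1), (-2, -1), (-1, -2), (1, -2), (2, -1)]
--     # backward dynamic programming: good = cells of value v from which the
--     # consecutive chain v, v+1, ..., 64 can be completed by knight moves
--     good = {(c, r) for r in range(8) for c in range(8) if board[r][c] == 64}
--     v = 63
--     while v >= movement and good:
--         good = {(c, r) for r in range(8) for c in range(8)
--                 if board[r][c] == v and any((c + dx, r + dy) in good for dx, dy in moves)}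
--         v -= 1
--     return (x, y) in good
-- ===== Notes on version B (the rewrite author's own statement) =====
-- stated objective: alternative
-- what changed: A's recursive backtracking DFS (re-exploring cells, no memoization) is replaced by a backward dynamic-programming pass: one set of 'good' cells per value from 64 down to movement, stopping early when the set empties, then a single membership test.
-- outside the precondition, e.g. on knight_movements([[1, 9, 9], [9, 9, 9], [9, 9, 2]], 0, 0, 1): A returns False, B raises IndexError
import Mathlib
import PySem

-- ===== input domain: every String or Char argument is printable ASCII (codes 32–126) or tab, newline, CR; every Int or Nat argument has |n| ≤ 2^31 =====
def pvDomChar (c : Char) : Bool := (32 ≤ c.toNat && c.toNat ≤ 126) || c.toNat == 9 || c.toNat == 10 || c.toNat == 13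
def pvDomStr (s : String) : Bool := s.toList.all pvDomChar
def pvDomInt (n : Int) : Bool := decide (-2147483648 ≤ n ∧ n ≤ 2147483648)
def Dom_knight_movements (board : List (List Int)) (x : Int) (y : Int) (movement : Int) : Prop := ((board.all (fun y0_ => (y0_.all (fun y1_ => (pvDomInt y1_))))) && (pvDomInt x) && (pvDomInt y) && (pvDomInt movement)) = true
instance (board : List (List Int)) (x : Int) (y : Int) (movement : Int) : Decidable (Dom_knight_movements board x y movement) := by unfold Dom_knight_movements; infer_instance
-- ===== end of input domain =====

-- B replaces A's recursive backtracking DFS by a backward dynamic-programming pass over the 8x8 cells (alternative algorithm, same observable behaviour).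

-- ===== PORT A =====
def pvXMove : List Int := [2, 1, -1, -2, -2, -1, 1, 2]
def pvYMove : List Int := [1, 2, 2, 1, -1, -2, -2, -1]

-- board[y][x] (Python raises IndexError where this is none)
def pvCell (board : List (List Int)) (y x : Int) : Option Int :=
  (PySem.List.pyGet? board y).bind (fun row => PySem.List.pyGet? row x)

-- cited by A's decreasing_by
theorem pv_filter_le (m : Int) (s : List Int) :
    (s.filter (fun w => decide (m + 1 ≤ w))).length ≤ (s.filter (fun w => decide (m ≤ w))).length := by
  induction s with
  | nil => simp
  | cons b u ihu =>
    simp only [List.filter_cons]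
    by_cases hb : m + 1 ≤ b
    · rw [if_pos (by simp; omega), if_pos (by simp; omega)]
      simpa using ihu
    · rw [if_neg (by simp; omega)]
      by_cases hb2 : m ≤ b
      · rw [if_pos (by simp; omega)]
        simp only [List.length_cons]
        omega
      · rw [if_neg (by simp; omega)]
        exact ihu

theorem pv_measure_lt (l : List Int) (m : Int) (hm : m ∈ l) :
    (l.filter (fun w => decide (m + 1 ≤ w))).length < (l.filter (fun w => decide (m ≤ w))).length := by
  induction l with
  | nil => simp at hm
  | cons a t ih =>
    simp only [List.filter_cons]
    rcases List.mem_cons.mp hm with rfl | hmt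
    · rw [if_neg (by simp), if_pos (by simp)]
      simp only [List.length_cons]
      have := pv_filter_le m t
      omega
    · have hlt := ih hmt
      by_cases hb : m + 1 ≤ a
      · rw [if_pos (by simp; omega), if_pos (by simp; omega)]
        simp only [List.length_cons]
        omega
      · rw [if_neg (by simp; omega)]
        by_cases hb2 : m ≤ a
        · rw [if_pos (by simp; omega)]
          simp only [List.length_cons]
          omega
        · rw [if_neg (by simp; omega)]
          exact hlt

theorem pvCell_mem {board : List (List Int)} {y x v : Int}
    (h : pvCell board y x = some v) : v ∈ board.flatten := by
  unfold pvCell at h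
  rcases Option.bind_eq_some_iff.mp h with ⟨row, hrow, hv⟩
  have h1 : row ∈ board := PySem.List.mem_of_pyGet?_eq_some _ hrow
  have h2 : v ∈ row := PySem.List.mem_of_pyGet?_eq_some _ hv
  exact List.mem_flatten.mpr ⟨row, h1, h2⟩

def knight_movements (board : List (List Int)) (x : Int) (y : Int) (movement : Int) : Bool :=
  if x < 0 ∨ x > 7 then false
  else if y < 0 ∨ y > 7 then false
  -- board[y][x] != movement  (board[y][x] = IndexError when the cell is missing; excluded by Pre_)
  else if pvCell board y x ≠ some movement then false
  else if movement = 64 then true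
  else (pvXMove.zip pvYMove).any
        (fun p => knight_movements board (x + p.1) (y + p.2) (movement + 1))
termination_by (board.flatten.filter (fun w => decide (movement ≤ w))).length
decreasing_by
  rename_i hne _
  exact pv_measure_lt _ movement (pvCell_mem (not_not.mp hne))

-- ===== PORT B =====
def kmMoves : List (Int × Int) :=
  [(2, 1), (1, 2), (-1, 2), (-2, 1), (-2, -1), (-1, -2), (1, -2), (2, -1)]

-- the pairs (c, r) for r in range(8) for c in range(8)
def kmCells : List (Int × Int) :=
  (List.range 8).flatMap (fun r : Nat => (List.range 8).map (fun c : Nat => ((c : Int), (r : Int))))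

-- board[r][c]; compared against `some v`, which equals Python's board[r][c] == v wherever
-- the cell exists (it always does whenever B's table pass runs under Pre_)
def kmCell? (board : List (List Int)) (c r : Int) : Option Int :=
  (PySem.List.pyGet? board r).bind (fun row => PySem.List.pyGet? row c)

-- {(c, r) … if board[r][c] == v and any(neighbour in good)}
def kmStep (board : List (List Int)) (v : Int) (good : List (Int × Int)) : List (Int × Int) :=
  PySem.Set.ofList (kmCells.filter (fun p =>
    kmCell? board p.1 p.2 == some v &&
      kmMoves.any (fun mv => good.contains (p.1 + mv.1, p.2 + mv.2))))

-- {(c, r) … if board[r][c] == 64}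
def kmInit (board : List (List Int)) : List (Int × Int) :=
  PySem.Set.ofList (kmCells.filter (fun p => kmCell? board p.1 p.2 == some 64))

-- while v >= movement and good: good = step; v -= 1
def kmLoop (board : List (List Int)) (v : Int) (m : Int) (good : List (Int × Int)) :
    List (Int × Int) :=
  if v < m ∨ good.isEmpty then good
  else kmLoop board (v - 1) m (kmStep board v good)
termination_by (v - m + 1).toNat
decreasing_by
  rename_i h
  rw [not_or] at h
  omega

def knight_movements_alt (board : List (List Int)) (x : Int) (y : Int) (movement : Int) : Bool :=
  if ¬(0 ≤ x ∧ x ≤ 7 ∧ 0 ≤ y ∧ y ≤ 7) then false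
  -- board[y][x] != movement  (IndexError when the cell is missing; excluded by Pre_)
  else if kmCell? board x y ≠ some movement then false
  else if movement = 64 then true
  else (kmLoop board 63 movement (kmInit board)).contains (x, y)

-- ===== PRECONDITION & SPEC =====
-- Pre_ excludes boards that lack the full 8x8 playing area while the addressed cell matches
-- movement (≠ 64): there A's recursion almost always raises IndexError (and B's whole-board
-- pass raises IndexError on the rare such inputs where A happens to return False first).
def Pre_knight_movements (board : List (List Int)) (x : Int) (y : Int) (movement : Int) : Prop :=
  (x < 0 ∨ 7 < x ∨ y < 0 ∨ 7 < y)
  ∨ (8 ≤ board.length ∧ ∀ row ∈ board.take 8, 8 ≤ row.length)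
  ∨ (pvCell board y x ≠ none ∧ (pvCell board y x ≠ some movement ∨ pvCell board y x = some 64))
instance (board : List (List Int)) (x : Int) (y : Int) (movement : Int) : Decidable (Pre_knight_movements board x y movement) := by unfold Pre_knight_movements; infer_instance

def pvWitness_knight_movements : List (List Int) × Int × Int × Int :=
  ([[1, 0, 0, 0, 0, 0, 0, 0], [0, 0, 2, 0, 0, 0, 0, 0], [0, 0, 0, 0, 0, 0, 0, 0],
    [0, 0, 0, 0, 0, 0, 0, 0], [0, 0, 0, 0, 0, 0, 0, 0], [0, 0, 0, 0, 0, 0, 0, 0],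
    [0, 0, 0, 0, 0, 0, 0, 0], [0, 0, 0, 0, 0, 0, 0, 0]], 0, 0, 1)

def Spec_knight_movements (board : List (List Int)) (x : Int) (y : Int) (movement : Int) (out : Bool) : Prop := out = knight_movements_alt board x y movement
instance (board : List (List Int)) (x : Int) (y : Int) (movement : Int) (out : Bool) : Decidable (Spec_knight_movements board x y movement out) := by unfold Spec_knight_movements; infer_instance

-- ===== CLAIM (what is proved, stated in full; the proofs are below) =====
def Claim_equal_knight_movements : Prop := ∀ (board : List (List Int)) (x : Int) (y : Int) (movement : Int), Dom_knight_movements board x y movement → Pre_knight_movements board x y movement → Spec_knight_movements board x y movement (knight_movements board x y movement)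

-- ===== LEMMAS AND PROOFS =====

-- the mathematical backward table: kmG v = set of cells from which v, v+1, …, 64 completes
def kmG (board : List (List Int)) (v : Int) : List (Int × Int) :=
  if 64 ≤ v then kmInit board else kmStep board v (kmG board (v + 1))
termination_by (64 - v).toNat
decreasing_by omega

def Ok8 (board : List (List Int)) : Prop :=
  8 ≤ board.length ∧ ∀ row ∈ board.take 8, 8 ≤ row.length

theorem kmCell?_eq_pvCell (board : List (List Int)) (c r : Int) :
    kmCell? board c r = pvCell board r c := rfl

theorem mem_kmCells (p : Int × Int) :
    p ∈ kmCells ↔ 0 ≤ p.1 ∧ p.1 ≤ 7 ∧ 0 ≤ p.2 ∧ p.2 ≤ 7 := by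
  obtain ⟨c, r⟩ := p
  constructor
  · intro hmem
    rcases List.mem_flatMap.mp hmem with ⟨rn, hrn, hmem2⟩
    rcases List.mem_map.mp hmem2 with ⟨cn, hcn, heq⟩
    rw [List.mem_range] at hrn hcn
    simp only [Prod.mk.injEq] at heq
    obtain ⟨rfl, rfl⟩ := heq
    omega
  · rintro ⟨h1, h2, h3, h4⟩
    refine List.mem_flatMap.mpr ⟨r.toNat, List.mem_range.mpr (show r.toNat < 8 by omega),
      List.mem_map.mpr ⟨c.toNat, List.mem_range.mpr (show c.toNat < 8 by omega), ?_⟩⟩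
    simp only [Prod.mk.injEq]
    omega

theorem mem_kmStep (board : List (List Int)) (v : Int) (good : List (Int × Int)) (p : Int × Int) :
    p ∈ kmStep board v good ↔
      p ∈ kmCells ∧ kmCell? board p.1 p.2 = some v ∧
        ∃ mv ∈ kmMoves, (p.1 + mv.1, p.2 + mv.2) ∈ good := by
  simp [kmStep, PySem.Set.mem_ofList, List.mem_filter, List.any_eq_true]

theorem mem_kmInit (board : List (List Int)) (p : Int × Int) :
    p ∈ kmInit board ↔ p ∈ kmCells ∧ kmCell? board p.1 p.2 = some 64 := by
  simp [kmInit, PySem.Set.mem_ofList, List.mem_filter]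

theorem kmStep_nil (board : List (List Int)) (v : Int) : kmStep board v [] = [] := by
  unfold kmStep
  have h : kmCells.filter (fun p => kmCell? board p.1 p.2 == some v &&
      kmMoves.any (fun mv => (([] : List (Int × Int)).contains (p.1 + mv.1, p.2 + mv.2)))) = [] := by
    apply List.filter_eq_nil_iff.mpr
    intro p _
    simp
  rw [h]
  rfl

theorem mem_kmG_val {board : List (List Int)} {v : Int} {p : Int × Int}
    (h : p ∈ kmG board v) :
    p ∈ kmCells ∧ kmCell? board p.1 p.2 = some (if 64 ≤ v then 64 else v) := by
  rw [kmG] at h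
  split at h <;> rename_i h64
  · simpa [h64] using (mem_kmInit board p).mp h
  · have := (mem_kmStep board v _ p).mp h
    simp only [if_neg h64]
    exact ⟨this.1, this.2.1⟩

theorem kmG_empty_below (board : List (List Int)) :
    ∀ (k : Nat) (v m : Int), (v - m).toNat = k → m ≤ v → kmG board v = [] → kmG board m = [] := by
  intro k
  induction k with
  | zero =>
    intro v m hk hm h
    have : m = v := by omega
    exact this ▸ h
  | succ k ih =>
    intro v m hk hm h
    have hmv : m < v := by omega
    by_cases h64 : (64:Int) ≤ m
    · rw [kmG] at h ⊢
      rw [if_pos h64]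
      rw [if_pos (by omega : (64:Int) ≤ v)] at h
      exact h
    · rw [kmG, if_neg h64]
      have hnext : kmG board (m + 1) = [] := ih v (m + 1) (by omega) (by omega) h
      rw [hnext, kmStep_nil]

theorem kmLoop_eq_G (board : List (List Int)) :
    ∀ (k : Nat) (v m : Int), (v + 1 - m).toNat = k → m ≤ v + 1 → v ≤ 63 →
      kmLoop board v m (kmG board (v + 1)) = kmG board m := by
  intro k
  induction k with
  | zero =>
    intro v m hk hm hv
    have hmv : m = v + 1 := by omega
    rw [kmLoop, if_pos (Or.inl (by omega))]
    rw [hmv]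
  | succ k ih =>
    intro v m hk hm hv
    have hmv : m ≤ v := by omega
    by_cases hg : kmG board (v + 1) = []
    · rw [kmLoop]
      rw [if_pos (Or.inr (by simp [hg]))]
      rw [hg]
      exact (kmG_empty_below board (v + 1 - m).toNat (v + 1) m rfl (by omega) hg).symm
    · rw [kmLoop, if_neg (by simp [hg]; omega)]
      have hstep : kmG board v = kmStep board v (kmG board (v + 1)) := by
        rw [kmG, if_neg (by omega : ¬ (64:Int) ≤ v)]
      rw [← hstep]
      have h' := ih (v - 1) m (by omega) (by omega) (by omega)
      rwa [show v - 1 + 1 = v by omega] at h'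

theorem kmCell?_some {board : List (List Int)} (h8 : Ok8 board) {c r : Int}
    (hc0 : 0 ≤ c) (hc7 : c ≤ 7) (hr0 : 0 ≤ r) (hr7 : r ≤ 7) :
    ∃ v, kmCell? board c r = some v := by
  obtain ⟨hlen, hrows⟩ := h8
  have hrlt : r.toNat < board.length := by omega
  have hrow8 : 8 ≤ board[r.toNat].length := by
    apply hrows
    have hT : (board.take 8)[r.toNat]'(by simp; omega) = board[r.toNat] := List.getElem_take
    rw [← hT]
    exact List.getElem_mem _
  have h1 : PySem.List.pyGet? board r = some (board[r.toNat]'hrlt) := by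
    rw [PySem.List.pyGet?_of_nonneg board (by omega), List.getElem?_eq_getElem hrlt]
  have h2 : PySem.List.pyGet? (board[r.toNat]'hrlt) c
      = some ((board[r.toNat]'hrlt)[c.toNat]'(by omega)) := by
    rw [PySem.List.pyGet?_of_nonneg (board[r.toNat]'hrlt) (by omega),
      List.getElem?_eq_getElem (by omega)]
  refine ⟨(board[r.toNat]'hrlt)[c.toNat]'(by omega), ?_⟩
  unfold kmCell?
  rw [h1]
  simpa using h2

-- the heart of the equivalence: on a full board A's DFS from a matching in-range cell
-- agrees with membership in the backward table
theorem km_main (board : List (List Int)) (h8 : Ok8 board) :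
    ∀ (k : Nat) (m x y : Int),
      (board.flatten.filter (fun w => decide (m ≤ w))).length ≤ k →
      0 ≤ x → x ≤ 7 → 0 ≤ y → y ≤ 7 → kmCell? board x y = some m →
      knight_movements board x y m = (kmG board m).contains (x, y) := by
  intro k
  induction k with
  | zero =>
    intro m x y hk hx0 hx7 hy0 hy7 hcell
    exfalso
    have hm : m ∈ board.flatten := pvCell_mem ((kmCell?_eq_pvCell board x y) ▸ hcell)
    have hmem : m ∈ board.flatten.filter (fun w => decide (m ≤ w)) :=
      List.mem_filter.mpr ⟨hm, by simp⟩
    have := List.length_pos_of_mem hmem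
    omega
  | succ k ih =>
    intro m x y hk hx0 hx7 hy0 hy7 hcell
    have hm : m ∈ board.flatten := pvCell_mem ((kmCell?_eq_pvCell board x y) ▸ hcell)
    have hmeas : (board.flatten.filter (fun w => decide (m + 1 ≤ w))).length ≤ k := by
      have := pv_measure_lt board.flatten m hm
      omega
    have hmemC : (x, y) ∈ kmCells := (mem_kmCells (x, y)).mpr ⟨hx0, hx7, hy0, hy7⟩
    rw [kmCell?_eq_pvCell] at hcell
    rw [knight_movements, if_neg (by omega), if_neg (by omega), hcell,
      if_neg (by simp)]
    by_cases h64 : m = 64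
    · rw [if_pos h64]
      have hmemG : (x, y) ∈ kmG board m := by
        rw [kmG, if_pos (by omega)]
        refine (mem_kmInit board (x, y)).mpr ⟨hmemC, ?_⟩
        rw [kmCell?_eq_pvCell, hcell, h64]
      simp [hmemG]
    · rw [if_neg h64]
      have hzip : pvXMove.zip pvYMove = kmMoves := by decide
      rw [hzip]
      by_cases hmlt : m < 64
      · -- pointwise: each recursive probe equals membership of the neighbour in kmG (m+1)
        have hpoint : ∀ mv : Int × Int,
            knight_movements board (x + mv.1) (y + mv.2) (m + 1)
              = decide ((x + mv.1, y + mv.2) ∈ kmG board (m + 1)) := by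
          intro mv
          by_cases hin : 0 ≤ x + mv.1 ∧ x + mv.1 ≤ 7 ∧ 0 ≤ y + mv.2 ∧ y + mv.2 ≤ 7
          · obtain ⟨v', hv'⟩ := kmCell?_some h8 hin.1 hin.2.1 hin.2.2.1 hin.2.2.2
            by_cases hveq : v' = m + 1
            · subst hveq
              rw [ih (m + 1) (x + mv.1) (y + mv.2) hmeas hin.1 hin.2.1 hin.2.2.1 hin.2.2.2 hv']
              simp
            · rw [kmCell?_eq_pvCell] at hv'
              rw [knight_movements, if_neg (by omega), if_neg (by omega), hv',
                if_pos (by simpa using fun h => hveq h)]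
              have hnot : (x + mv.1, y + mv.2) ∉ kmG board (m + 1) := by
                intro hmem
                have hval := (mem_kmG_val hmem).2
                rw [kmCell?_eq_pvCell, hv'] at hval
                have hval' := Option.some.inj hval
                by_cases hc : (64:Int) ≤ m + 1
                · rw [if_pos hc] at hval'
                  exact hveq (by omega)
                · rw [if_neg hc] at hval'
                  exact hveq hval'
              simp [hnot]
          · have hfalse : knight_movements board (x + mv.1) (y + mv.2) (m + 1) = false := by
              rw [knight_movements]
              by_cases h1 : x + mv.1 < 0 ∨ x + mv.1 > 7
              · rw [if_pos h1]
              · rw [if_neg h1, if_pos (by omega)]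
            rw [hfalse]
            have hnot : (x + mv.1, y + mv.2) ∉ kmG board (m + 1) := by
              intro hmem
              have := (mem_kmG_val hmem).1
              rw [mem_kmCells] at this
              omega
            simp [hnot]
        have hGm : kmG board m = kmStep board m (kmG board (m + 1)) := by
          rw [kmG, if_neg (by omega)]
        rw [Bool.eq_iff_iff, List.any_eq_true]
        constructor
        · rintro ⟨mv, hmv, hrec⟩
          rw [hpoint mv] at hrec
          have hmemG : (x, y) ∈ kmG board m := by
            rw [hGm, mem_kmStep]
            refine ⟨hmemC, ?_, mv, hmv, by simpa using hrec⟩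
            rw [kmCell?_eq_pvCell, hcell]
          simp [hmemG]
        · intro hcont
          have hmemG : (x, y) ∈ kmG board m := by
            simpa using hcont
          rw [hGm, mem_kmStep] at hmemG
          obtain ⟨_, _, mv, hmv, hnb⟩ := hmemG
          exact ⟨mv, hmv, by rw [hpoint mv]; simpa using hnb⟩
      · -- m > 64: both sides are false
        have hgt : 64 < m := by omega
        have hfalse : ∀ mv : Int × Int,
            knight_movements board (x + mv.1) (y + mv.2) (m + 1) = false := by
          intro mv
          by_cases hin : 0 ≤ x + mv.1 ∧ x + mv.1 ≤ 7 ∧ 0 ≤ y + mv.2 ∧ y + mv.2 ≤ 7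
          · obtain ⟨v', hv'⟩ := kmCell?_some h8 hin.1 hin.2.1 hin.2.2.1 hin.2.2.2
            by_cases hveq : v' = m + 1
            · subst hveq
              rw [ih (m + 1) (x + mv.1) (y + mv.2) hmeas hin.1 hin.2.1 hin.2.2.1 hin.2.2.2 hv']
              have hnm : (x + mv.1, y + mv.2) ∉ kmG board (m + 1) := by
                intro hmem
                have hval := (mem_kmG_val hmem).2
                rw [hv'] at hval
                have hval' := Option.some.inj hval
                rw [if_pos (by omega)] at hval'
                omega
              simp [hnm]
            · rw [kmCell?_eq_pvCell] at hv'
              rw [knight_movements, if_neg (by omega), if_neg (by omega), hv',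
                if_pos (by simpa using fun h => hveq h)]
          · rw [knight_movements]
            by_cases h1 : x + mv.1 < 0 ∨ x + mv.1 > 7
            · rw [if_pos h1]
            · rw [if_neg h1, if_pos (by omega)]
        have hnotG : (x, y) ∉ kmG board m := by
          intro hmem
          have hval := (mem_kmG_val hmem).2
          rw [kmCell?_eq_pvCell, hcell] at hval
          have hval' := Option.some.inj hval
          rw [if_pos (by omega)] at hval'
          omega
        have hrhs : (kmG board m).contains (x, y) = false := by simp [hnotG]
        rw [hrhs, List.any_eq_false]
        intro mv _
        simp [hfalse mv]

-- ===== VERDICT (by name: the statement is the Claim_ definition above) =====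
theorem knight_movements_spec : Claim_equal_knight_movements := by
  intro board x y movement hdom hpre
  unfold Spec_knight_movements
  by_cases hout : x < 0 ∨ 7 < x ∨ y < 0 ∨ 7 < y
  · rw [knight_movements_alt, if_pos (by omega)]
    rw [knight_movements]
    by_cases h1 : x < 0 ∨ x > 7
    · rw [if_pos h1]
    · rw [if_neg h1, if_pos (by omega)]
  · rw [not_or, not_or, not_or] at hout
    obtain ⟨hx0', hx7', hy0', hy7'⟩ := hout
    have hx0 : 0 ≤ x := by omega
    have hx7 : x ≤ 7 := by omega
    have hy0 : 0 ≤ y := by omega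
    have hy7 : y ≤ 7 := by omega
    rw [knight_movements, if_neg (by omega), if_neg (by omega)]
    have hin : 0 ≤ x ∧ x ≤ 7 ∧ 0 ≤ y ∧ y ≤ 7 := ⟨hx0, hx7, hy0, hy7⟩
    rw [knight_movements_alt, if_neg (not_not_intro hin)]
    rw [kmCell?_eq_pvCell]
    cases hc : pvCell board y x with
    | none =>
      rw [if_pos (show (none : Option Int) ≠ some movement from by simp),
        if_pos (show (none : Option Int) ≠ some movement from by simp)]
    | some v =>
      by_cases hvm : v = movement
      · subst hvm
        rw [if_neg (show ¬ (some v ≠ some v) from by simp),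
          if_neg (show ¬ (some v ≠ some v) from by simp)]
        by_cases h64 : v = 64
        · rw [if_pos h64, if_pos h64]
        · rw [if_neg h64, if_neg h64]
          have h8 : Ok8 board := by
            rcases hpre with h | h | h
            · exact absurd h (by omega)
            · exact h
            · rcases h.2 with h2 | h2
              · exact absurd hc h2
              · rw [hc] at h2
                exact absurd (Option.some.inj h2) h64
          have hmain := km_main board h8
            (board.flatten.filter (fun w => decide (v ≤ w))).length v x y le_rfl
            hx0 hx7 hy0 hy7
            (by rw [kmCell?_eq_pvCell, hc])
          rw [knight_movements, if_neg (by omega), if_neg (by omega), hc,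
            if_neg (show ¬ (some v ≠ some v) from by simp), if_neg h64] at hmain
          rw [hmain]
          have hinit : kmInit board = kmG board 64 := by
            rw [kmG, if_pos (by omega)]
          rw [hinit]
          by_cases hle : v ≤ 64
          · rw [show kmG board 64 = kmG board (63 + 1) from rfl]
            rw [kmLoop_eq_G board (63 + 1 - v).toNat 63 v rfl (by omega) (by omega)]
          · rw [kmLoop, if_pos (Or.inl (by omega))]
            have hsame : kmG board v = kmG board 64 := by
              rw [kmG, if_pos (by omega), kmG, if_pos (by omega)]
            rw [hsame]
      · rw [if_pos (show some v ≠ some movement from by simp [hvm]),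
          if_pos (show some v ≠ some movement from by simp [hvm])]
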